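-- pv_equiv track=rewrite | github.com/pdanbi00/algorithm | 프로그래머스/3/161988. 연속 펄스 부분 수열의 합/연속 펄스 부분 수열의 합.py | solution
-- ===== SOURCE A (Python) =====
-- def solution(sequence):
--     answer = 0
--     N = len(sequence)
--     # dp[i][j] :
--     # j -> 0일 경우 sequence[i]에 -1을 곱했을 때 i번째 수까지의 연속 펄스 부분 수열의 합 중 가장 큰 수
--     # j -> 1일 경우 sequence[i]에 1을 곱했을 때 i번째 수까지의 연속 펄스 부분 수열의 합 중 가장 큰 수
--
--     dp = [[0] * 2 for _ in range(N)]
--     dp[0][0] = sequence[0] * -1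
--     dp[0][1] = sequence[0] * 1
--     for i in range(1, N):
--         dp[i][0] = sequence[i] * -1
--         dp[i][1] = sequence[i] * 1
--
--         dp[i][0] = max(dp[i][0], dp[i-1][1] + dp[i][0])
--         dp[i][1] = max(dp[i][1], dp[i-1][0] + dp[i][1])
--
--     for i in range(N):
--         answer = max(answer, dp[i][0], dp[i][1])
--
--     return answer
-- ===== SOURCE B (Python) =====
-- def solution(sequence):
--     a = []
--     sign = 1
--     for x in sequence:
--         a.append(sign * x)
--         sign = -sign
--
--     def kadane(xs):
--         cur = best = xs[0]
--         for x in xs[1:]: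
--             cur = max(x, cur + x)
--             best = max(best, cur)
--         return best
--
--     return max(0, kadane(a), kadane([-x for x in a]))
-- ===== Notes on version B (the rewrite author's own statement) =====
-- stated objective: simpler
-- what changed: Replaces the 2-column DP table (built by index loop, then scanned by a second loop for the maximum) with an alternating-sign transform of the input followed by two standard Kadane maximum-subarray passes (on a and on -a), returning max(0, best_a, best_b).
-- outside the precondition, e.g. on solution([]): A raises IndexError, B raises IndexError
import Mathlib
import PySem

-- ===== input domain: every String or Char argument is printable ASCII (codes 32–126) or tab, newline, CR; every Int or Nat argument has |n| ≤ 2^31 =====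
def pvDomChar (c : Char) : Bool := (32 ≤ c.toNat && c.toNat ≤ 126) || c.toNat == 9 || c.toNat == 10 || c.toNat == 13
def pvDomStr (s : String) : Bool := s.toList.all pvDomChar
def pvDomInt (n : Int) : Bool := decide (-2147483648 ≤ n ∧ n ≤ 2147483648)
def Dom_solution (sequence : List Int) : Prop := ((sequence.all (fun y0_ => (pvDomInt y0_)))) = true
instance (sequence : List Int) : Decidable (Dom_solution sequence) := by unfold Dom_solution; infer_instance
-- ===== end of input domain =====

-- B replaces A's 2-column DP table + final table scan with an alternating-sign
-- transform and two Kadane maximum-subarray passes (simpler, same O(n) cost).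

-- ===== PORT A =====
-- Literal port of A: dp list of pairs (dp[i][0], dp[i][1]), filled by an index
-- loop, then a second index loop taking the maximum.  On [] Python raises
-- IndexError at sequence[0]; Pre_solution excludes it (pyGetD/pySetD defaults
-- are never reached on nonempty input).
def solution (sequence : List Int) : Int :=
  let N : Int := PySem.List.len sequence
  let dp : List (Int × Int) := List.replicate sequence.length ((0 : Int), (0 : Int))
  let dp := PySem.List.pySetD dp 0
      (PySem.List.pyGetD sequence 0 0 * -1, PySem.List.pyGetD sequence 0 0 * 1)
  let dp := (PySem.List.pyRange 1 N 1).foldl (fun dp i =>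
      let d0 := PySem.List.pyGetD sequence i 0 * -1
      let d1 := PySem.List.pyGetD sequence i 0 * 1
      let prev := PySem.List.pyGetD dp (i - 1) ((0 : Int), (0 : Int))
      let d0 := max d0 (prev.2 + d0)
      let d1 := max d1 (prev.1 + d1)
      PySem.List.pySetD dp i (d0, d1)) dp
  (PySem.List.pyRange 0 N 1).foldl (fun answer i =>
      let p := PySem.List.pyGetD dp i ((0 : Int), (0 : Int))
      max (max answer p.1) p.2) 0

-- ===== PORT B =====
-- B-side helper: body of kadane's loop (cur, best) -> next (cur, best)
def kstep (cb : Int × Int) (y : Int) : Int × Int :=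
  let c := max y (cb.1 + y); (c, max cb.2 c)

-- kadane: cur = best = xs[0]; fold over xs[1:].  [] unreachable (Python raises
-- IndexError there; Pre_solution excludes the empty sequence).
def kadaneAlt (xs : List Int) : Int :=
  match xs with
  | [] => 0
  | x :: rest => (rest.foldl kstep (x, x)).2

def solution_alt (sequence : List Int) : Int :=
  let a := (sequence.foldl
      (fun (st : List Int × Int) x => (st.1 ++ [st.2 * x], -st.2)) ([], 1)).1
  max (max 0 (kadaneAlt a)) (kadaneAlt (a.map (fun x => -x)))

-- ===== PRECONDITION & SPEC =====
-- On [] both A and B raise IndexError (sequence[0] / xs[0]); only that input is excluded.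
def Pre_solution (sequence : List Int) : Prop := sequence ≠ []
instance (sequence : List Int) : Decidable (Pre_solution sequence) := by
  unfold Pre_solution; infer_instance
def pvWitness_solution : List Int := [2, 3, -6, 1, 3, -1, 2, 4]
def Spec_solution (sequence : List Int) (out : Int) : Prop := out = solution_alt sequence
instance (sequence : List Int) (out : Int) : Decidable (Spec_solution sequence out) := by
  unfold Spec_solution; infer_instance

-- ===== CLAIM (what is proved, stated in full; the proofs are below) =====
def Claim_equal_solution : Prop := ∀ (sequence : List Int), Dom_solution sequence → Pre_solution sequence → Spec_solution sequence (solution sequence)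

-- ===== LEMMAS AND PROOFS =====

-- dp recurrence of A, written with exactly the port's arithmetic
def dpNext (p : Int × Int) (s : Int) : Int × Int :=
  (max (s * -1) (p.2 + s * -1), max (s * 1) (p.1 + s * 1))

-- the dp table: entry for the current position, then the entries for the rest
def dpl (p : Int × Int) : List Int → List (Int × Int)
  | [] => [p]
  | s :: xs => p :: dpl (dpNext p s) xs

-- running maximum over the dp entries still to come
def ansRec (p : Int × Int) (M : Int) : List Int → Int
  | [] => M
  | s :: xs => ansRec (dpNext p s) (max (max M (dpNext p s).1) (dpNext p s).2) xs

def sgn (e : Bool) (x : Int) : Int := if e then x else -x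

-- alternating-sign view; e = sign of the first element
def signedL (e : Bool) : List Int → List Int
  | [] => []
  | x :: xs => sgn e x :: signedL (!e) xs

theorem length_dpl (xs : List Int) : ∀ p, (dpl p xs).length = xs.length + 1 := by
  induction xs with
  | nil => intro p; rfl
  | cons s xs ih => intro p; simp [dpl, ih]

theorem buildA (xs : List Int) : ∀ (acc : List Int) (e : Bool),
    (xs.foldl (fun (st : List Int × Int) x => (st.1 ++ [st.2 * x], -st.2))
      (acc, if e then 1 else -1)).1 = acc ++ signedL e xs := by
  induction xs with
  | nil => intro acc e; simp [signedL]
  | cons x xs ih =>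
      intro acc e
      have h1 : (if e then (1 : Int) else -1) * x = sgn e x := by
        cases e <;> simp [sgn]
      have h2 : -(if e then (1 : Int) else -1) = if !e then 1 else -1 := by
        cases e <;> simp
      simp only [List.foldl_cons, h1, h2, ih (acc ++ [sgn e x]) (!e), signedL]
      simp

theorem pv_set_append_len {α : Type} : ∀ (pre ys : List α) (n : Nat) (a : α),
    (pre ++ ys).set (pre.length + n) a = pre ++ ys.set n a := by
  intro pre
  induction pre with
  | nil => intro ys n a; simp
  | cons x xs ih => intro ys n a; simp [Nat.succ_add, ih]

theorem loop1 (seq : List Int) : ∀ (todo : List Int) (pre : List (Int × Int)) (p : Int × Int),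
    seq.drop (pre.length + 1) = todo →
    (PySem.List.pyRange ((pre.length : Int) + 1) ((pre.length : Int) + 1 + todo.length) 1).foldl
      (fun dp i =>
        let d0 := PySem.List.pyGetD seq i 0 * -1
        let d1 := PySem.List.pyGetD seq i 0 * 1
        let prev := PySem.List.pyGetD dp (i - 1) ((0 : Int), (0 : Int))
        let d0 := max d0 (prev.2 + d0)
        let d1 := max d1 (prev.1 + d1)
        PySem.List.pySetD dp i (d0, d1))
      (pre ++ p :: List.replicate todo.length ((0 : Int), (0 : Int)))
      = pre ++ dpl p todo := by
  intro todo
  induction todo with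
  | nil =>
      intro pre p h
      rw [PySem.List.pyRange_one_eq_nil (by simp)]
      simp [dpl]
  | cons t ts ih =>
      intro pre p h
      have hget : seq[pre.length + 1]? = some t := by
        have h0 : (List.drop (pre.length + 1) seq)[0]? = seq[pre.length + 1 + 0]? :=
          List.getElem?_drop
        rw [h] at h0
        simpa using h0.symm
      have hdrop2 : seq.drop (pre.length + 1 + 1) = ts := by
        have h1 := congrArg (List.drop 1) h
        rwa [List.drop_drop, List.drop_succ_cons, List.drop_zero] at h1
      have e1 : PySem.List.pyGetD seq ((pre.length : Int) + 1) 0 = t := by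
        rw [show ((pre.length : Int) + 1) = ((pre.length + 1 : Nat) : Int) by push_cast; ring]
        rw [PySem.List.pyGetD_natCast]
        simp [List.getD, hget]
      have e2 : PySem.List.pyGetD
          (pre ++ p :: (0, 0) :: List.replicate ts.length ((0 : Int), (0 : Int)))
          ((pre.length : Int)) ((0 : Int), (0 : Int)) = p := by
        rw [PySem.List.pyGetD_natCast]
        simp [List.getD]
      have e3 : ∀ q : Int × Int,
          (pre ++ p :: (0, 0) :: List.replicate ts.length ((0 : Int), (0 : Int))).set
            (pre.length + 1) q
          = (pre ++ [p]) ++ q :: List.replicate ts.length ((0 : Int), (0 : Int)) := by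
        intro q
        rw [pv_set_append_len pre _ 1 _]
        simp [List.set]
      have e4 : ((pre.length : Int) + 1).toNat = pre.length + 1 := by omega
      rw [List.length_cons, List.replicate_succ]
      rw [PySem.List.pyRange_one_cons (by push_cast; omega)]
      rw [List.foldl_cons]
      simp only [add_sub_cancel_right, e1, e2]
      rw [show ((pre.length : Int) + 1) = ((pre.length + 1 : Nat) : Int) by push_cast; ring,
        PySem.List.pySetD_natCast, e3]
      have hih := ih (pre ++ [p]) (dpNext p t) (by simpa using hdrop2)
      rw [show dpl p (t :: ts) = p :: dpl (dpNext p t) ts from rfl, List.append_cons]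
      simpa [dpNext, List.length_append, add_assoc, add_comm, add_left_comm] using hih

theorem dpl_foldl (xs : List Int) : ∀ (p : Int × Int) (m : Int),
    (dpl p xs).foldl (fun a q => max (max a q.1) q.2) m
      = ansRec p (max (max m p.1) p.2) xs := by
  induction xs with
  | nil => intro p m; rfl
  | cons s xs ih =>
      intro p m
      simp only [dpl, List.foldl_cons, ansRec]
      exact ih _ _

theorem core (rest : List Int) : ∀ (e : Bool) (u v bA bB m : Int),
    ansRec (u, v) (max m (max bA bB)) rest
      = max m (max ((signedL e rest).foldl kstep ((if e then u else v), bA)).2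
                   (((signedL e rest).map (fun x => -x)).foldl kstep
                     ((if e then v else u), bB)).2) := by
  induction rest with
  | nil => intro e u v bA bB m; simp [ansRec, signedL]
  | cons s xs ih =>
      intro e u v bA bB m
      have hA : kstep ((if e then u else v), bA) (sgn e s)
          = ((if !e then (dpNext (u, v) s).1 else (dpNext (u, v) s).2),
             max bA (if !e then (dpNext (u, v) s).1 else (dpNext (u, v) s).2)) := by
        cases e <;> simp [kstep, sgn, dpNext, mul_one]
      have hB : kstep ((if e then v else u), bB) (-sgn e s)
          = ((if !e then (dpNext (u, v) s).2 else (dpNext (u, v) s).1),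
             max bB (if !e then (dpNext (u, v) s).2 else (dpNext (u, v) s).1)) := by
        cases e <;> simp [kstep, sgn, dpNext, mul_one]
      have hM : ∀ u' v' : Int, max (max (max m (max bA bB)) u') v'
          = max m (max (max bA (if !e then u' else v')) (max bB (if !e then v' else u'))) := by
        intro u' v'
        cases e <;> simp [max_comm, max_left_comm]
      simp only [signedL, List.map_cons, List.foldl_cons, ansRec]
      rw [hA, hB, hM (dpNext (u, v) s).1 (dpNext (u, v) s).2]
      have h2 := ih (!e) (dpNext (u, v) s).1 (dpNext (u, v) s).2
        (max bA (if !e then (dpNext (u, v) s).1 else (dpNext (u, v) s).2))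
        (max bB (if !e then (dpNext (u, v) s).2 else (dpNext (u, v) s).1)) m
      simpa using h2

-- ===== VERDICT =====
theorem solution_spec : Claim_equal_solution := by
  unfold Claim_equal_solution
  intro seq _hdom hpre
  unfold Spec_solution
  obtain ⟨s0, rest, rfl⟩ := List.exists_cons_of_ne_nil hpre
  have hset : ∀ q : Int × Int, PySem.List.pySetD
      ((0, 0) :: List.replicate rest.length ((0 : Int), (0 : Int))) 0 q
      = q :: List.replicate rest.length ((0 : Int), (0 : Int)) := by
    intro q
    rw [PySem.List.pySetD_of_nonneg _ q le_rfl]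
    rfl
  have L1 := loop1 (s0 :: rest) rest [] (s0 * -1, s0 * 1) (by simp)
  simp only [List.nil_append, List.length_nil, Nat.cast_zero, zero_add] at L1
  have hA : solution (s0 :: rest)
      = ansRec (s0 * -1, s0 * 1) (max (max 0 (s0 * -1)) (s0 * 1)) rest := by
    unfold solution
    simp only [PySem.List.len_eq, List.length_cons, List.replicate_succ,
      PySem.List.pyGetD_zero_cons, hset, Nat.cast_add, Nat.cast_one]
    rw [show ((rest.length : Int) + 1) = 1 + (rest.length : Int) by ring, L1]
    rw [show (1 : Int) + (rest.length : Int) = (((dpl (s0 * -1, s0 * 1) rest).length : Nat) : Int) by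
      rw [length_dpl]; push_cast; ring]
    rw [PySem.List.foldl_pyRange_zero_pyGetD' (dpl (s0 * -1, s0 * 1) rest) ((0 : Int), (0 : Int))
      (fun a q => max (max a q.1) q.2) 0]
    exact dpl_foldl rest _ 0
  have hB : solution_alt (s0 :: rest)
      = max (max 0 ((signedL false rest).foldl kstep (s0, s0)).2)
            (((signedL false rest).map (fun x => -x)).foldl kstep (-s0, -s0)).2 := by
    unfold solution_alt
    have ha := buildA (s0 :: rest) [] true
    simp only [if_true, List.nil_append] at ha
    rw [ha]
    simp [signedL, sgn, kadaneAlt]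
  have hc := core rest false (s0 * -1) (s0 * 1) s0 (-s0) 0
  simp only [if_false, mul_one, mul_neg_one, Bool.false_eq_true] at hc
  rw [hA, hB]
  simp only [mul_one, mul_neg_one]
  rw [show max (max 0 (-s0)) s0 = max 0 (max s0 (-s0)) by
    simp [max_comm]]
  rw [hc]
  simp [max_assoc]
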